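-- pv_equiv track=rewrite | github.com/LogCreative/Python-Assignments | exam/p2.py | sort2D
-- ===== SOURCE A (Python) =====
-- def merge(list1, list2, arr):
--     i1 = 0
--     i2 = 0
--     n1 = len(list1)
--     n2 = len(list2)
--     k = 0
--     while i1 < n1 and i2 < n2:
--         j1 = list1[i1]
--         j2 = list2[i2]
--         if j1 < j2:
--             arr[k] = j1
--             i1 += 1
--         else:
--             arr[k] = j2
--             i2 += 1
--         k += 1
--     while i1 < n1:
--         arr[k] = list1[i1]
--         i1 += 1
--         k += 1
--     while i2 < n2:
--         arr[k] = list2[i2]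
--         i2 += 1
--         k += 1
--
-- def mergeSort1D(arr):
--     n = len(arr)
--     if n > 1:
--         m = n // 2
--         list1, list2 = arr[:m], arr[m:]
--         mergeSort1D(list1)
--         mergeSort1D(list2)
--         merge(list1, list2, arr)
--
-- def sort2D(array):
--     m = len(array)
--     n = len(array[0])
--     array1D = []
--     for l in array:
--         array1D.extend(l)
--     mergeSort1D(array1D)
--     for i in range(m):
--         for j in range(n):
--             array[i][j] = array1D[i * n + j]
--     return array
-- ===== SOURCE B (Python) =====
-- def sort2D(array):
--     n = len(array[0])
--     flat = sorted(x for row in array for x in row)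
--     for i, row in enumerate(array):
--         row[:n] = flat[i * n:(i + 1) * n]
--     return array
-- ===== Notes on version B (the rewrite author's own statement) =====
-- stated objective: idiomatic
-- what changed: B replaces A's hand-written recursive merge sort and nested index write-back loops by the builtin sorted() over a flattened comprehension and per-row slice assignment row[:n] = flat[i*n:(i+1)*n] via enumerate (builtin C sort: large measured constant-factor speedup).
import Mathlib
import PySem

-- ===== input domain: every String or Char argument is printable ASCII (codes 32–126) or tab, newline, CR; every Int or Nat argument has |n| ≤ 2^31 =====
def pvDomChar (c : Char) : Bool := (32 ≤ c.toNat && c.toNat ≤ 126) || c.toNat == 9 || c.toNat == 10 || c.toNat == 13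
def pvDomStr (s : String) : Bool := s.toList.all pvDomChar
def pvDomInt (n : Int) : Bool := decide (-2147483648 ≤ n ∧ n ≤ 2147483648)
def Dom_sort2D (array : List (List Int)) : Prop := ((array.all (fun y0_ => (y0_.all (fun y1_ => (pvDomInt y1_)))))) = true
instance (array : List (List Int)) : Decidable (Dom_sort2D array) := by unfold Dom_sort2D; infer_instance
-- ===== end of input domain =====

-- B replaces A's hand-written recursive merge sort and nested index write-back loops by the
-- builtin sort over a flattened list and per-row slice assignment (idiomatic; equivalence is
-- about the return value; both Pythons also mutate `array` in place).

-- ===== PORT A =====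
-- merge(list1, list2, arr): the two index pointers i1/i2 become structural recursion (made
-- total with fuel = n1+n2, which is never exhausted); arr is exactly the merged output (arr has
-- length n1+n2 at every call site).
def mergeAF : Nat → List Int → List Int → List Int
  | _, [], list2 => list2
  | _, list1, [] => list1
  | 0, list1, list2 => list1 ++ list2
  | fuel + 1, j1 :: list1, j2 :: list2 =>
      if j1 < j2 then j1 :: mergeAF fuel list1 (j2 :: list2)
      else j2 :: mergeAF fuel (j1 :: list1) list2

def mergeA (list1 list2 : List Int) : List Int :=
  mergeAF (list1.length + list2.length) list1 list2

-- mergeSort1D(arr): recursion made total with fuel = len(arr) (depth is ≤ len, so this fuel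
-- never runs out; Pre_ is not needed for this guard).
def mergeSort1DF : Nat → List Int → List Int
  | 0, arr => arr
  | fuel + 1, arr =>
      if arr.length > 1 then
        let m := arr.length / 2
        mergeA (mergeSort1DF fuel (arr.take m)) (mergeSort1DF fuel (arr.drop m))
      else arr

def mergeSort1D (arr : List Int) : List Int := mergeSort1DF arr.length arr

-- sort2D: len(array[0]) totalized with headD (empty array raises IndexError: outside Pre_);
-- arr[i][j] = array1D[i*n+j] becomes List.set with a getD read (in range inside Pre_).
def sort2D (array : List (List Int)) : List (List Int) :=
  let m := array.length
  let n := (array.headD []).length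
  let array1D := array.foldl (fun acc l => acc ++ l) []
  let sorted1D := mergeSort1D array1D
  (List.range m).foldl (fun acc i =>
    (List.range n).foldl (fun acc2 j =>
      acc2.set i ((acc2.getD i []).set j (sorted1D.getD (i * n + j) 0))) acc) array

-- ===== PORT B =====
-- flat = sorted(x for row in array for x in row); row[:n] = flat[i*n:(i+1)*n] per enumerate:
-- the slice assignment makes the row flat[i*n:(i+1)*n] ++ row[n:] (exact Python semantics).
def sort2D_alt (array : List (List Int)) : List (List Int) :=
  let n : Int := ((array.headD []).length : Int)
  let flat := PySem.List.sorted (array.flatMap (fun row => row)) (fun x => x) false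
  (PySem.List.enumerate array 0).map
    (fun p => PySem.List.slice flat (some (p.1 * n)) (some ((p.1 + 1) * n))
      ++ PySem.List.slice p.2 (some n) none)

-- ===== PRECONDITION & SPEC =====
-- Pre_ = exactly the inputs where A returns: a non-empty array whose rows are all at least as
-- long as the first row (otherwise array[0] or an arr[i][j] assignment raises IndexError).
def Pre_sort2D (array : List (List Int)) : Prop :=
  array ≠ [] ∧ ∀ row ∈ array, (array.headD []).length ≤ row.length
instance (array : List (List Int)) : Decidable (Pre_sort2D array) := by
  unfold Pre_sort2D; infer_instance
def pvWitness_sort2D : List (List Int) := [[3, 1], [2, 0]]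

def Spec_sort2D (array : List (List Int)) (out : List (List Int)) : Prop :=
  out = sort2D_alt array
instance (array : List (List Int)) (out : List (List Int)) : Decidable (Spec_sort2D array out) := by
  unfold Spec_sort2D; infer_instance

-- ===== CLAIM (what is proved, stated in full; the proofs are below) =====
def Claim_equal_sort2D : Prop :=
  ∀ (array : List (List Int)), Dom_sort2D array → Pre_sort2D array →
    Spec_sort2D array (sort2D array)

-- ===== LEMMAS AND PROOFS =====


-- merge produces a permutation of its inputs (any fuel)
theorem mergeAF_perm : ∀ (fuel : Nat) (l1 l2 : List Int), (mergeAF fuel l1 l2).Perm (l1 ++ l2) := by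
  intro fuel
  induction fuel with
  | zero => intro l1 l2; cases l1 <;> cases l2 <;> simp [mergeAF]
  | succ f ih =>
    intro l1 l2
    match l1, l2 with
    | [], l2 => simp [mergeAF]
    | x :: l1, [] => simp [mergeAF]
    | j1 :: l1, j2 :: l2 =>
      simp only [mergeAF]
      split
      · simp only [List.cons_append]
        exact (ih l1 (j2 :: l2)).cons j1
      · exact ((ih (j1 :: l1) l2).cons j2).trans List.perm_middle.symm

-- merge of two sorted lists is sorted, given enough fuel
theorem mergeAF_sorted : ∀ (fuel : Nat) (l1 l2 : List Int),
    l1.length + l2.length ≤ fuel →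
    l1.Pairwise (· ≤ ·) → l2.Pairwise (· ≤ ·) → (mergeAF fuel l1 l2).Pairwise (· ≤ ·) := by
  intro fuel
  induction fuel with
  | zero =>
    intro l1 l2 h h1 h2
    match l1, l2 with
    | [], [] => simp only [mergeAF]; exact h2
    | [], x :: l2 => simp only [mergeAF]; exact h2
    | x :: l1, [] => simpa [mergeAF] using h1
    | x :: l1, y :: l2 => simp at h
  | succ f ih =>
    intro l1 l2 h h1 h2
    match l1, l2 with
    | [], l2 => simpa [mergeAF] using h2
    | x :: l1, [] => simpa [mergeAF] using h1
    | j1 :: l1, j2 :: l2 =>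
      simp only [mergeAF]
      rw [List.pairwise_cons] at h1 h2
      split
      · rename_i hlt
        rw [List.pairwise_cons]
        refine ⟨?_, ih l1 (j2 :: l2) (by simp at h ⊢; omega) h1.2 (List.pairwise_cons.mpr h2)⟩
        intro b hb
        have hb' : b ∈ l1 ++ j2 :: l2 := (mergeAF_perm f l1 (j2 :: l2)).mem_iff.mp hb
        rcases List.mem_append.mp hb' with hb1 | hb2
        · exact h1.1 b hb1
        · rcases List.mem_cons.mp hb2 with rfl | hb3
          · exact le_of_lt hlt
          · exact le_of_lt (lt_of_lt_of_le hlt (h2.1 b hb3))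
      · rename_i hnlt
        have hle : j2 ≤ j1 := by omega
        rw [List.pairwise_cons]
        refine ⟨?_, ih (j1 :: l1) l2 (by simp at h ⊢; omega) (List.pairwise_cons.mpr h1) h2.2⟩
        intro b hb
        have hb' : b ∈ (j1 :: l1) ++ l2 := (mergeAF_perm f (j1 :: l1) l2).mem_iff.mp hb
        rcases List.mem_append.mp hb' with hb1 | hb2
        · rcases List.mem_cons.mp hb1 with rfl | hb3
          · exact hle
          · exact le_trans hle (h1.1 b hb3)
        · exact h2.1 b hb2

theorem mergeA_perm (l1 l2 : List Int) : (mergeA l1 l2).Perm (l1 ++ l2) :=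
  mergeAF_perm _ l1 l2

theorem mergeA_sorted (l1 l2 : List Int) (h1 : l1.Pairwise (· ≤ ·)) (h2 : l2.Pairwise (· ≤ ·)) :
    (mergeA l1 l2).Pairwise (· ≤ ·) :=
  mergeAF_sorted _ l1 l2 le_rfl h1 h2

theorem msf_perm : ∀ (fuel : Nat) (l : List Int), (mergeSort1DF fuel l).Perm l := by
  intro fuel
  induction fuel with
  | zero => intro l; simp [mergeSort1DF]
  | succ f ih =>
    intro l
    simp only [mergeSort1DF]
    split
    · exact (mergeA_perm _ _).trans (((ih _).append (ih _)).trans (by simp))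
    · exact List.Perm.refl l

theorem msf_sorted : ∀ (fuel : Nat) (l : List Int),
    l.length ≤ fuel + 1 → (mergeSort1DF fuel l).Pairwise (· ≤ ·) := by
  intro fuel
  induction fuel with
  | zero =>
    intro l h
    match l with
    | [] => simp [mergeSort1DF]
    | [x] => simp [mergeSort1DF]
    | x :: y :: l => simp at h
  | succ f ih =>
    intro l h
    simp only [mergeSort1DF]
    split
    · rename_i hlen
      apply mergeA_sorted
      · exact ih _ (by simp; omega)
      · exact ih _ (by simp; omega)
    · rename_i hlen
      match l with
      | [] => simp
      | [x] => simp
      | x :: y :: l => simp at hlen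

theorem mergeSort1D_perm (l : List Int) : (mergeSort1D l).Perm l := msf_perm _ l

theorem mergeSort_eq_sorted (l : List Int) :
    PySem.List.sorted l (fun x => x) false = mergeSort1D l :=
  PySem.List.sorted_id_eq_of_perm_of_pairwise l (mergeSort1D l) (mergeSort1D_perm l)
    (msf_sorted l.length l (by omega))

theorem foldl_append_flatten (rows : List (List Int)) :
    rows.foldl (fun acc l => acc ++ l) [] = rows.flatten := by
  suffices h : ∀ (rows : List (List Int)) (init : List Int),
      rows.foldl (fun acc l => acc ++ l) init = init ++ rows.flatten by
    simpa using h rows []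
  intro rows
  induction rows with
  | nil => simp
  | cons r rows ih => intro init; simp [ih]

theorem flatten_len_ge {β : Type} (n : Nat) :
    ∀ (rows : List (List β)), (∀ r ∈ rows, n ≤ r.length) →
      rows.length * n ≤ rows.flatten.length := by
  intro rows
  induction rows with
  | nil => simp
  | cons r rows ih =>
    intro h
    have hr := h r (by simp)
    have hrec := ih (fun r hm => h r (by simp [hm]))
    simp only [List.flatten_cons, List.length_append, List.length_cons, Nat.succ_mul]
    omega

-- step facts about the partially written prefix (map over range k) ++ (untouched suffix)
theorem step_getD {β : Type} (G : Nat → β) (d : β) (k : Nat) (xs : List β) (_h : k < xs.length) :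
    ((List.range k).map G ++ xs.drop k).getD k d = xs.getD k d := by
  have hl : ((List.range k).map G).length = k := by simp
  rw [List.getD_eq_getElem?_getD, List.getD_eq_getElem?_getD,
      List.getElem?_append_right (by omega), hl]
  simp only [Nat.sub_self, List.getElem?_drop, Nat.add_zero]

theorem step_set {β : Type} (G : Nat → β) (k : Nat) (xs : List β) (h : k < xs.length) :
    ((List.range k).map G ++ xs.drop k).set k (G k)
      = (List.range (k + 1)).map G ++ xs.drop (k + 1) := by
  have hl : ((List.range k).map G).length = k := by simp
  have hdrop : xs.drop k = xs[k] :: xs.drop (k + 1) := List.drop_eq_getElem_cons h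
  rw [List.set_append_right _ _ (by omega), hl, Nat.sub_self, hdrop, List.set_cons_zero,
      List.range_succ, List.map_append]
  simp

-- a fold of writes at indices 0..k-1 = written prefix ++ untouched suffix
theorem foldl_set_range {β : Type} (f : Nat → β → β) (d : β) :
    ∀ (k : Nat) (xs : List β), k ≤ xs.length →
      (List.range k).foldl (fun r j => r.set j (f j (r.getD j d))) xs
        = (List.range k).map (fun j => f j (xs.getD j d)) ++ xs.drop k := by
  intro k
  induction k with
  | zero => intro xs h; simp
  | succ k ih =>
    intro xs h
    rw [List.range_succ, List.foldl_append, ih xs (by omega)]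
    simp only [List.foldl_cons, List.foldl_nil]
    rw [step_getD _ d k xs (by omega), step_set (fun j => f j (xs.getD j d)) k xs (by omega),
        List.range_succ]

-- repeated writes at one fixed outer index i localize to that entry
theorem foldl_set_at {β : Type} (d : β) (i : Nat) (g : Nat → β → β) :
    ∀ (L : List Nat) (acc : List β), i < acc.length →
      L.foldl (fun a j => a.set i (g j (a.getD i d))) acc
        = acc.set i (L.foldl (fun r j => g j r) (acc.getD i d)) := by
  intro L
  induction L with
  | nil =>
    intro acc h
    simp [List.getD_eq_getElem?_getD, List.getElem?_eq_getElem h]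
  | cons j L ih =>
    intro acc h
    simp only [List.foldl_cons]
    rw [ih _ (by simpa using h)]
    have hset : (acc.set i (g j (acc.getD i d))).getD i d = g j (acc.getD i d) := by
      rw [List.getD_eq_getElem?_getD, List.getElem?_set_self (by simpa using h)]; rfl
    rw [hset, List.set_set]

-- characterization of A's outer write-back loop
theorem outer_fold (s : List Int) (n : Nat) :
    ∀ (k : Nat) (xs : List (List Int)), k ≤ xs.length →
      (List.range k).foldl (fun acc i => (List.range n).foldl
          (fun acc2 j => acc2.set i ((acc2.getD i []).set j (s.getD (i * n + j) 0))) acc) xs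
        = (List.range k).map (fun i => (List.range n).foldl
            (fun r j => r.set j (s.getD (i * n + j) 0)) (xs.getD i [])) ++ xs.drop k := by
  intro k
  induction k with
  | zero => intro xs h; simp
  | succ k ih =>
    intro xs h
    rw [List.range_succ, List.foldl_append, ih xs (by omega)]
    simp only [List.foldl_cons, List.foldl_nil]
    have hlen : ((List.range k).map (fun i => (List.range n).foldl
        (fun r j => r.set j (s.getD (i * n + j) 0)) (xs.getD i [])) ++ xs.drop k).length
        = xs.length := by simp; omega
    rw [foldl_set_at [] k (fun j r => r.set j (s.getD (k * n + j) 0)) (List.range n) _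
        (by omega)]
    rw [step_getD _ [] k xs (by omega)]
    rw [step_set (fun i => (List.range n).foldl
      (fun r j => r.set j (s.getD (i * n + j) 0)) (xs.getD i [])) k xs (by omega),
        List.range_succ]

theorem take_drop_eq_map {β : Type} (xs : List β) (d : β) (a n : Nat) (h : a + n ≤ xs.length) :
    (xs.drop a).take n = (List.range n).map (fun j => xs.getD (a + j) d) := by
  apply List.ext_getElem
  · simp; omega
  · intro j h1 h2
    simp only [List.getElem_take, List.getElem_drop, List.getElem_map, List.getElem_range]
    rw [List.getD_eq_getElem?_getD, List.getElem?_eq_getElem (by simp at h1; omega)]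
    rfl

theorem map_enumerate {α β : Type} (h : Int → α → β) (d : α) :
    ∀ (xs : List α) (s : Int), (PySem.List.enumerate xs s).map (fun p => h p.1 p.2)
      = (List.range xs.length).map (fun (i : Nat) => h (s + (i : Int)) (xs.getD i d)) := by
  intro xs
  induction xs with
  | nil => intro s; simp [PySem.List.enumerate_nil]
  | cons x xs ih =>
    intro s
    rw [PySem.List.enumerate_cons, List.map_cons, ih (s + 1)]
    have hr : List.range (x :: xs).length = 0 :: (List.range xs.length).map Nat.succ := by
      simp [List.range_succ_eq_map]
    rw [hr, List.map_cons, List.map_map]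
    congr 1
    · norm_num
    · apply List.map_congr_left
      intro i _
      simp only [Function.comp_apply, List.getD_cons_succ]
      congr 1
      push_cast
      ring

-- A's full characterization inside Pre_ (rows all at least n long)
theorem sort2D_char (array : List (List Int)) :
    sort2D array = (List.range array.length).map (fun i => (List.range (array.headD []).length).foldl
        (fun r j => r.set j ((mergeSort1D array.flatten).getD (i * (array.headD []).length + j) 0)) (array.getD i [])) := by
  unfold sort2D
  rw [foldl_append_flatten]
  rw [outer_fold _ _ array.length array le_rfl]
  simp

theorem alt_char (array : List (List Int)) :
    sort2D_alt array = (List.range array.length).map (fun i =>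
      ((PySem.List.sorted array.flatten (fun x => x) false).drop
          (i * (array.headD []).length)).take (array.headD []).length
        ++ (array.getD i []).drop (array.headD []).length) := by
  have hfm : array.flatMap (fun row => row) = array.flatten := by
    simp [List.flatMap_def]
  show (PySem.List.enumerate array 0).map
      (fun p => PySem.List.slice
          (PySem.List.sorted (array.flatMap (fun row => row)) (fun x => x) false)
          (some (p.1 * ((array.headD []).length : Int)))
          (some ((p.1 + 1) * ((array.headD []).length : Int)))
        ++ PySem.List.slice p.2 (some ((array.headD []).length : Int)) none) = _
  rw [hfm, map_enumerate (fun z row =>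
    PySem.List.slice (PySem.List.sorted array.flatten (fun x => x) false)
      (some (z * ((array.headD []).length : Int)))
      (some ((z + 1) * ((array.headD []).length : Int)))
      ++ PySem.List.slice row (some ((array.headD []).length : Int)) none) []]
  apply List.map_congr_left
  intro i _
  have e1 : ((0 : Int) + (i : Int)) * ((array.headD []).length : Int)
      = ((i * (array.headD []).length : Nat) : Int) := by push_cast; ring
  have e2 : (((0 : Int) + (i : Int)) + 1) * ((array.headD []).length : Int)
      = ((i * (array.headD []).length + (array.headD []).length : Nat) : Int) := by
    push_cast; ring
  rw [e1, e2, PySem.List.slice_natCast, PySem.List.slice_from_natCast]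
  congr 2
  omega

-- ===== VERDICT (by name: the statement is the Claim_ definition above) =====
theorem sort2D_spec : Claim_equal_sort2D := by
  intro array _ hpre
  rcases hpre with ⟨-, hge⟩
  have hslen : array.length * (array.headD []).length
      ≤ (mergeSort1D array.flatten).length := by
    rw [(mergeSort1D_perm _).length_eq]
    exact flatten_len_ge _ array hge
  show sort2D array = sort2D_alt array
  rw [sort2D_char array, alt_char array, mergeSort_eq_sorted]
  apply List.map_congr_left
  intro i hi
  rw [List.mem_range] at hi
  have hmem : array.getD i [] ∈ array := by
    have h2 : array.getD i [] = array[i] := by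
      rw [List.getD_eq_getElem?_getD, List.getElem?_eq_getElem hi]; rfl
    rw [h2]; exact List.getElem_mem hi
  have hrowlen : (array.headD []).length ≤ (array.getD i []).length := hge _ hmem
  have hL : (List.range (array.headD []).length).foldl
      (fun r j => r.set j ((mergeSort1D array.flatten).getD
        (i * (array.headD []).length + j) 0)) (array.getD i [])
      = (List.range (array.headD []).length).map
          (fun j => (mergeSort1D array.flatten).getD (i * (array.headD []).length + j) 0)
        ++ (array.getD i []).drop (array.headD []).length :=
    foldl_set_range (fun j _ => (mergeSort1D array.flatten).getD
      (i * (array.headD []).length + j) 0) 0 _ _ (by omega)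
  rw [hL]
  have hmul : (i + 1) * (array.headD []).length
      = i * (array.headD []).length + (array.headD []).length := by ring
  have hle : (i + 1) * (array.headD []).length
      ≤ array.length * (array.headD []).length := Nat.mul_le_mul_right _ hi
  rw [take_drop_eq_map (mergeSort1D array.flatten) 0
      (i * (array.headD []).length) (array.headD []).length (by omega)]
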